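-- pv_equiv track=rewrite | github.com/KylarJordgubbar/Advent-of-Code-2023 | day11.py | expand_universe_in_one_direction
-- ===== SOURCE A (Python) =====
-- def increment_vals_over_limit(l, limit):
--     res = []
--     for e in l:
--         if e > limit:
--             res.append(e + 1)
--         else:
--             res.append(e)
--     return res
--
-- def expand_universe_in_one_direction(vals):
--     i = 0
--     while i < max(vals):
--         if not vals.__contains__(i):
--             vals = increment_vals_over_limit(vals, i)
--             i += 1
--         i += 1
--     return vals
-- ===== SOURCE B (Python) =====
-- def expand_universe_in_one_direction(vals):
--     distinct = set(vals)
--     res = []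
--     for v in vals:
--         if v >= 0:
--             below = sum(1 for u in distinct if 0 <= u < v)
--             res.append(2 * v - below)
--         else:
--             res.append(v)
--     return res
-- ===== Notes on version B (the rewrite author's own statement) =====
-- stated objective: faster
-- what changed: Instead of repeatedly rewriting the whole list while scanning every integer coordinate up to the (growing) maximum, B builds the set of values once and maps each value v to v plus the number of missing non-negative integers below it (2*v minus the count of distinct values in [0,v)), in one pass over the list.
-- outside the precondition, e.g. on expand_universe_in_one_direction([]): A raises ValueError, B returns []
import Mathlib
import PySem

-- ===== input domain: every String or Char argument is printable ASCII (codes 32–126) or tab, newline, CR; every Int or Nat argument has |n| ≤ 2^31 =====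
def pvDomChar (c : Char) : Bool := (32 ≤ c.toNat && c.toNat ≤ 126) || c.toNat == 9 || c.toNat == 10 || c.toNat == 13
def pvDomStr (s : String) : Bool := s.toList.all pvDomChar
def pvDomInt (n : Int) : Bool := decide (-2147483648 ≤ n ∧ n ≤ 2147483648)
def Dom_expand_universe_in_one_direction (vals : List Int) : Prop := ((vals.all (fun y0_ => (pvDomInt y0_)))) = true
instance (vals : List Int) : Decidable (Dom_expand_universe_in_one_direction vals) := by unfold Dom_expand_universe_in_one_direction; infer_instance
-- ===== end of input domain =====

-- B replaces A's coordinate-by-coordinate rewriting loop by one pass mapping each value v to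
-- v + (number of missing non-negative integers below v); objective: faster (independent of value magnitude).
-- A mutates nothing (it rebinds `vals`); equivalence is about the return value.

-- ===== PORT A =====
def increment_vals_over_limit (l : List Int) (limit : Int) : List Int :=
  l.foldl (fun res e => if e > limit then res ++ [e + 1] else res ++ [e]) []

-- Python max(vals); the .getD 0 only totalizes the empty case, which Pre_ excludes (Python raises).
def pyMaxA (l : List Int) : Int := (PySem.List.max? l (fun y => y)).getD 0

lemma increment_eq_map (l : List Int) (limit : Int) :
    increment_vals_over_limit l limit = l.map (fun e => if limit < e then e + 1 else e) := by
  unfold increment_vals_over_limit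
  have : (fun (res : List Int) (e : Int) => if e > limit then res ++ [e + 1] else res ++ [e])
      = (fun res e => res ++ [if limit < e then e + 1 else e]) := by
    funext res e; split <;> simp_all
  rw [this, PySem.List.foldl_append_singleton_eq_map]; rfl

lemma max_comm_of_mono (g : Int → Int) (hg : ∀ a b : Int, a ≤ b → g a ≤ g b) (a b : Int) :
    g (max a b) = max (g a) (g b) := by
  rcases le_total a b with h | h
  · rw [max_eq_right h, max_eq_right (hg _ _ h)]
  · rw [max_eq_left h, max_eq_left (hg _ _ h)]

lemma foldl_max_map (g : Int → Int) (hg : ∀ a b : Int, a ≤ b → g a ≤ g b) :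
    ∀ (t : List Int) (x : Int), (t.map g).foldl max (g x) = g (t.foldl max x) := by
  intro t
  induction t with
  | nil => intro x; simp
  | cons a t ih => intro x; simp only [List.map_cons, List.foldl_cons,
      ← max_comm_of_mono g hg x a, ih]

lemma pyMaxA_map (g : Int → Int) (hg : ∀ a b : Int, a ≤ b → g a ≤ g b)
    (l : List Int) (hne : l ≠ []) : pyMaxA (l.map g) = g (pyMaxA l) := by
  cases l with
  | nil => exact absurd rfl hne
  | cons x t =>
      simp only [pyMaxA, List.map_cons, PySem.List.max?_id_cons, Option.getD_some]
      exact foldl_max_map g hg t x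

lemma incr_mono (i : Int) : ∀ a b : Int, a ≤ b →
    (if i < a then a + 1 else a) ≤ (if i < b then b + 1 else b) := by
  intro a b h; split <;> split <;> omega

lemma pyMaxA_increment_le (l : List Int) (i : Int) :
    pyMaxA (increment_vals_over_limit l i) ≤ pyMaxA l + 1 := by
  cases l with
  | nil => simp [increment_vals_over_limit, pyMaxA, PySem.List.max?]
  | cons x t =>
      rw [increment_eq_map, pyMaxA_map _ (incr_mono i) _ (by simp)]
      split <;> omega

def aLoop (vals : List Int) (i : Int) : List Int :=
  if h : i < pyMaxA vals then
    if vals.contains i then aLoop vals (i + 1)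
    else aLoop (increment_vals_over_limit vals i) (i + 2)
  else vals
termination_by (pyMaxA vals - i).toNat
decreasing_by
  · omega
  · have := pyMaxA_increment_le vals i; omega

def expand_universe_in_one_direction (vals : List Int) : List Int :=
  aLoop vals 0

-- ===== PORT B =====
def expand_universe_in_one_direction_alt (vals : List Int) : List Int :=
  let distinct : PySem.Set Int := PySem.Set.ofList vals
  vals.foldl (fun res v =>
    if v ≥ 0 then
      res ++ [2 * v - (distinct.map (fun u => if 0 ≤ u ∧ u < v then (1 : Int) else 0)).sum]
    else res ++ [v]) []

-- ===== PRECONDITION & SPEC =====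
-- Pre_ excludes only the empty list, on which Python's max([]) raises ValueError (B would return []).
def Pre_expand_universe_in_one_direction (vals : List Int) : Prop := vals ≠ []
instance (vals : List Int) : Decidable (Pre_expand_universe_in_one_direction vals) := by
  unfold Pre_expand_universe_in_one_direction; infer_instance

def pvWitness_expand_universe_in_one_direction : List Int := [0, 3, 1]

def Spec_expand_universe_in_one_direction (vals : List Int) (out : List Int) : Prop :=
  out = expand_universe_in_one_direction_alt vals
instance (vals : List Int) (out : List Int) : Decidable (Spec_expand_universe_in_one_direction vals out) := by
  unfold Spec_expand_universe_in_one_direction; infer_instance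

-- ===== CLAIM (what is proved, stated in full; the proofs are below) =====
def Claim_equal_expand_universe_in_one_direction : Prop :=
  ∀ (vals : List Int), Dom_expand_universe_in_one_direction vals →
    Pre_expand_universe_in_one_direction vals →
    Spec_expand_universe_in_one_direction vals (expand_universe_in_one_direction vals)

-- ===== LEMMAS AND PROOFS =====
def gapCount (L : List Int) (t : Int) : Int :=
  (((List.range t.toNat).map (fun g : Nat => (g : Int))).filter (fun g => !(L.contains g))).length
def sh (L : List Int) (t v : Int) : Int := v + gapCount L (min t v)
lemma gapCount_mono (L : List Int) : ∀ (s t : Int), s ≤ t → gapCount L s ≤ gapCount L t := by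
  intro s t h
  unfold gapCount
  have hn : t.toNat = s.toNat + (t.toNat - s.toNat) := by omega
  rw [hn, List.range_add]
  simp [List.filter_append]
lemma gapCount_nonpos (L : List Int) (t : Int) (h : t ≤ 0) : gapCount L t = 0 := by
  unfold gapCount
  have : t.toNat = 0 := by omega
  simp [this]
lemma sh_lt (L : List Int) (t v : Int) (hv : v < t) : sh L t v < t + gapCount L t := by
  unfold sh
  rw [min_eq_right hv.le]
  have := gapCount_mono L v t hv.le
  omega
lemma sh_gt (L : List Int) (t v : Int) (hv : t < v) : sh L t v = v + gapCount L t := by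
  unfold sh; rw [min_eq_left hv.le]
lemma sh_self (L : List Int) (t : Int) : sh L t t = t + gapCount L t := by
  simp [sh]
lemma sh_mono (L : List Int) (t : Int) : ∀ a b : Int, a ≤ b → sh L t a ≤ sh L t b := by
  intro a b h
  unfold sh
  have := gapCount_mono L (min t a) (min t b) (by omega)
  omega
lemma mem_map_sh_iff (L : List Int) (t : Int) :
    ((t + gapCount L t) ∈ L.map (sh L t)) ↔ t ∈ L := by
  constructor
  · intro h
    rcases List.mem_map.1 h with ⟨v, hvL, hveq⟩
    rcases lt_trichotomy v t with hlt | rfl | hgt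
    · exact absurd hveq (by have := sh_lt L t v hlt; omega)
    · exact hvL
    · rw [sh_gt L t v hgt] at hveq; omega
  · intro h
    exact List.mem_map.2 ⟨t, h, sh_self L t⟩
lemma gapCount_succ (L : List Int) (t : Int) (ht : 0 ≤ t) :
    gapCount L (t + 1) = gapCount L t + (if t ∈ L then 0 else 1) := by
  unfold gapCount
  have h1 : (t + 1).toNat = t.toNat + 1 := by omega
  have h2 : ((t.toNat : Int)) = t := by omega
  rw [h1, List.range_succ]
  by_cases hm : t ∈ L <;> simp [List.filter_append, h2, hm]
lemma map_sh_succ_mem (L : List Int) (t : Int) (ht : 0 ≤ t) (hm : t ∈ L) :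
    L.map (sh L (t + 1)) = L.map (sh L t) := by
  apply List.map_congr_left
  intro v hv
  unfold sh
  rcases le_or_gt v t with h | h
  · rw [min_eq_right h, min_eq_right (by omega)]
  · rw [min_eq_left h, min_eq_left (by omega), gapCount_succ L t ht, if_pos hm, add_zero]
lemma map_sh_succ_not_mem (L : List Int) (t : Int) (ht : 0 ≤ t) (hm : t ∉ L) :
    (L.map (sh L t)).map (fun e => if (t + gapCount L t) < e then e + 1 else e)
      = L.map (sh L (t + 1)) := by
  rw [List.map_map]
  apply List.map_congr_left
  intro v hv
  simp only [Function.comp]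
  rcases lt_trichotomy v t with hlt | rfl | hgt
  · rw [if_neg (by have := sh_lt L t v hlt; omega)]
    unfold sh
    rw [min_eq_right hlt.le, min_eq_right (by omega)]
  · exact absurd hv hm
  · rw [sh_gt L t v hgt, if_pos (by omega), sh]
    rw [min_eq_left (by omega), gapCount_succ L t ht, if_neg hm]
    ring
lemma mem_le_pyMaxA (L : List Int) (v : Int) (hv : v ∈ L) : v ≤ pyMaxA L := by
  cases L with
  | nil => simp at hv
  | cons x t =>
      have h := PySem.List.max?_isMax (PySem.List.max?_id_cons (x := x) (t := t))
      simpa [pyMaxA, PySem.List.max?_id_cons] using h v hv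
lemma pyMaxA_map_sh (L : List Int) (hne : L ≠ []) (t : Int) :
    pyMaxA (L.map (sh L t)) = sh L t (pyMaxA L) :=
  pyMaxA_map (sh L t) (sh_mono L t) L hne
lemma loop_inv (L : List Int) (hne : L ≠ []) :
    ∀ (n : Nat) (t : Int), 0 ≤ t → t ≤ pyMaxA L → (pyMaxA L - t).toNat = n →
      aLoop (L.map (sh L t)) (t + gapCount L t) = L.map (sh L (pyMaxA L)) := by
  intro n
  induction n with
  | zero =>
      intro t ht htm hn
      have ht' : t = pyMaxA L := by omega
      rw [aLoop, dif_neg]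
      · rw [ht']
      · rw [pyMaxA_map_sh L hne t, sh, min_eq_left htm, ht']
        omega
  | succ n ih =>
      intro t ht htm hn
      have htlt : t < pyMaxA L := by omega
      rw [aLoop, dif_pos]
      · by_cases hm : t ∈ L
        · rw [if_pos (by simpa using (mem_map_sh_iff L t).2 hm)]
          have e1 : L.map (sh L t) = L.map (sh L (t + 1)) := (map_sh_succ_mem L t ht hm).symm
          have e2 : t + gapCount L t + 1 = (t + 1) + gapCount L (t + 1) := by
            rw [gapCount_succ L t ht, if_pos hm]; ring
          rw [e1, e2]
          exact ih (t + 1) (by omega) (by omega) (by omega)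
        · rw [if_neg (by simpa using fun h => hm ((mem_map_sh_iff L t).1 h))]
          rw [increment_eq_map, map_sh_succ_not_mem L t ht hm]
          have e2 : t + gapCount L t + 2 = (t + 1) + gapCount L (t + 1) := by
            rw [gapCount_succ L t ht, if_neg hm]; ring
          rw [e2]
          exact ih (t + 1) (by omega) (by omega) (by omega)
      · rw [pyMaxA_map_sh L hne t, sh, min_eq_left htm]
        omega
lemma alt_eq_map (L : List Int) :
    expand_universe_in_one_direction_alt L
      = L.map (fun v => if 0 ≤ v then
          2 * v - (((PySem.Set.ofList L).countP (fun u => decide (0 ≤ u ∧ u < v))) : Int)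
        else v) := by
  unfold expand_universe_in_one_direction_alt
  dsimp only
  have hb : (fun (res : List Int) (v : Int) =>
      if v ≥ 0 then
        res ++ [2 * v - ((PySem.Set.ofList L).map (fun u => if 0 ≤ u ∧ u < v then (1 : Int) else 0)).sum]
      else res ++ [v])
      = (fun res v => res ++ [if 0 ≤ v then
          2 * v - (((PySem.Set.ofList L).countP (fun u => decide (0 ≤ u ∧ u < v))) : Int)
        else v]) := by
    funext res v
    by_cases h : 0 ≤ v
    · rw [if_pos h, if_pos h]
      have : (fun u : Int => if 0 ≤ u ∧ u < v then (1 : Int) else 0)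
          = (fun u : Int => if (decide (0 ≤ u ∧ u < v)) = true then (1 : Int) else 0) := by
        funext u; simp
      rw [this, PySem.List.sum_map_ite_one_zero]
    · rw [if_neg h, if_neg h]
  rw [hb, PySem.List.foldl_append_singleton_eq_map, List.nil_append]
lemma count_add_gap (L : List Int) (v : Int) (hv : 0 ≤ v) :
    (((PySem.Set.ofList L).countP (fun u => decide (0 ≤ u ∧ u < v))) : Int)
      + gapCount L v = v := by
  have hRnodup : ((List.range v.toNat).map (fun g : Nat => (g : Int))).Nodup :=
    List.Nodup.map (fun a b h => by exact_mod_cast h) List.nodup_range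
  have hmemR : ∀ u : Int, u ∈ (List.range v.toNat).map (fun g : Nat => (g : Int)) ↔ 0 ≤ u ∧ u < v := by
    intro u
    simp only [List.mem_map, List.mem_range]
    constructor
    · rintro ⟨g, hg, rfl⟩; omega
    · rintro ⟨h0, h1⟩; exact ⟨u.toNat, by omega, by omega⟩
  have hperm : ((PySem.Set.ofList L).filter (fun u => decide (0 ≤ u ∧ u < v))).Perm
      (((List.range v.toNat).map (fun g : Nat => (g : Int))).filter (fun g => L.contains g)) := by
    rw [List.perm_ext_iff_of_nodup (List.Nodup.filter _ (PySem.Set.nodup_ofList L)) (hRnodup.filter _)]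
    intro u
    simp only [List.mem_filter, PySem.Set.mem_ofList, hmemR, List.contains_iff_mem,
      decide_eq_true_eq]
    tauto
  have hsplit := (List.length_eq_length_filter_add
    (l := (List.range v.toNat).map (fun g : Nat => (g : Int))) (fun g => L.contains g)).symm
  rw [List.countP_eq_length_filter, hperm.length_eq]
  unfold gapCount
  have hlen : ((List.range v.toNat).map (fun g : Nat => (g : Int))).length = v.toNat := by simp
  omega
lemma expand_equiv (L : List Int) (hpre : L ≠ []) :
    expand_universe_in_one_direction L = expand_universe_in_one_direction_alt L := by
  rw [alt_eq_map]
  unfold expand_universe_in_one_direction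
  by_cases h0 : 0 ≤ pyMaxA L
  · have hmap0 : L.map (sh L 0) = L := by
      have hpt : ∀ v ∈ L, sh L 0 v = id v := by
        intro v _
        unfold sh
        rw [gapCount_nonpos L _ (by omega : min 0 v ≤ 0)]
        simp
      rw [List.map_congr_left hpt, List.map_id]
    have h := loop_inv L hpre (pyMaxA L).toNat 0 le_rfl h0 (by omega)
    rw [hmap0, gapCount_nonpos L 0 le_rfl, add_zero] at h
    rw [h]
    apply List.map_congr_left
    intro v hv
    have hvmax := mem_le_pyMaxA L v hv
    by_cases hv0 : 0 ≤ v
    · rw [if_pos hv0]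
      unfold sh
      rw [min_eq_right hvmax]
      have := count_add_gap L v hv0
      omega
    · rw [if_neg hv0]
      unfold sh
      rw [min_eq_right hvmax, gapCount_nonpos L v (by omega)]
      omega
  · rw [aLoop, dif_neg (by omega)]
    have hpt : ∀ v ∈ L, id v = (if 0 ≤ v then
        2 * v - (((PySem.Set.ofList L).countP (fun u => decide (0 ≤ u ∧ u < v))) : Int)
      else v) := by
      intro v hv
      have := mem_le_pyMaxA L v hv
      rw [if_neg (by omega)]
      rfl
    conv_lhs => rw [← List.map_id L]
    exact List.map_congr_left hpt

-- ===== VERDICT (by name: the statement is the Claim_ definition above) =====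
theorem expand_universe_in_one_direction_spec : Claim_equal_expand_universe_in_one_direction := by
  intro vals _ hpre
  unfold Spec_expand_universe_in_one_direction
  exact expand_equiv vals hpre
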